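-- pv_equiv track=rewrite | github.com/deLimaNicolas/exercises | 3854/solution.py | makeParityAlternating
-- ===== SOURCE A (Python) =====
-- from typing import List
--
-- def makeParityAlternating(nums: List[int]) -> List[int]:
--     if len(nums) == 1:
--         return [0, 0]
--     start_even_change = []
--     start_odd_change = []
--
--     for idx, num in enumerate(nums):
--         if (idx + 1) % 2 == 0:
--             if num % 2 == 0:
--                 start_even_change.append(idx)
--             else:
--                 start_odd_change.append(idx)
--         else:
--             if num % 2 != 0:
--                 start_even_change.append(idx)
--             else:
--                 start_odd_change.append(idx)
--
--     se = set(start_even_change)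
--     so = set(start_odd_change)
--
--     mn = min(nums)
--     mx = max(nums)
--
--     def apply_changes(changes: set) -> tuple[int, int]:
--         keep_min = keep_max = False
--
--         for i, x in enumerate(nums):
--             if i not in changes:
--                 # this element stays as-is
--                 if x == mn:
--                     keep_min = True
--                 if x == mx:
--                     keep_max = True
--
--         new_min = mn if keep_min else mn + 1
--         new_max = mx if keep_max else mx - 1
--
--         return len(changes), max(new_max - new_min, 1)
--
--     if len(se) == len(so):
--         return list(min(apply_changes(se), apply_changes(so)))
--
--     chosen = se if len(se) < len(so) else so
--     return list(apply_changes(chosen))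
-- ===== SOURCE B (Python) =====
-- from typing import List
--
-- def makeParityAlternating(nums: List[int]) -> List[int]:
--     # Single pass: count mismatched-parity positions and track in the same loop
--     # whether the min/max survive either change-set; no sets, no re-scans.
--     if len(nums) == 1:
--         return [0, 0]
--     mn, mx = min(nums), max(nums)
--     n_se = 0
--     km_se = kM_se = km_so = kM_so = False
--     for i, x in enumerate(nums):
--         if x % 2 != i % 2:
--             n_se += 1
--             if x == mn:
--                 km_so = True
--             if x == mx:
--                 kM_so = True
--         else:
--             if x == mn:
--                 km_se = True
--             if x == mx:
--                 kM_se = True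
--
--     def score(km: bool, kM: bool) -> int:
--         return max((mx if kM else mx - 1) - (mn if km else mn + 1), 1)
--
--     n_so = len(nums) - n_se
--     if n_se == n_so:
--         return [n_se, min(score(km_se, kM_se), score(km_so, kM_so))]
--     if n_se < n_so:
--         return [n_se, score(km_se, kM_se)]
--     return [n_so, score(km_so, kM_so)]
-- ===== Notes on version B (the rewrite author's own statement) =====
-- stated objective: faster
-- what changed: B replaces A's two classification lists, the two index sets and the two full re-scans of apply_changes by one single pass that counts parity-mismatched positions and tracks four booleans (does min/max survive each change-set), then assembles the answer arithmetically.
-- outside the precondition, e.g. on makeParityAlternating([]): A raises ValueError, B raises ValueError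
import Mathlib
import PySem

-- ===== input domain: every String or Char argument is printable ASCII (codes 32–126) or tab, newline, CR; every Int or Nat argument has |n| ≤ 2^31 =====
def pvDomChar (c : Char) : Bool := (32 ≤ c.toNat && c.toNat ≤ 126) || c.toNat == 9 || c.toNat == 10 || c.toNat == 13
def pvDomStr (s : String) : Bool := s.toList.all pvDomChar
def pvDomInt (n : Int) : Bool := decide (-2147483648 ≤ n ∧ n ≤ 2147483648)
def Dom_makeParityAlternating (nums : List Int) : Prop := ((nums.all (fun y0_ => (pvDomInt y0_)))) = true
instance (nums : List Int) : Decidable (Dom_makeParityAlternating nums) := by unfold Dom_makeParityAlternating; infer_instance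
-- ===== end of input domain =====

-- B does A's job in one classification pass (count + four survival booleans) instead of
-- building lists/sets of indices and re-scanning the whole array for each candidate set.

-- ===== PORT A =====
def pvA_classify (acc : List Int × List Int) (e : Int × Int) : List Int × List Int :=
  if PySem.Int.mod (e.1 + 1) 2 == 0 then
    if PySem.Int.mod e.2 2 == 0 then (acc.1 ++ [e.1], acc.2) else (acc.1, acc.2 ++ [e.1])
  else
    if PySem.Int.mod e.2 2 != 0 then (acc.1 ++ [e.1], acc.2) else (acc.1, acc.2 ++ [e.1])

def pvA_apply (nums : List Int) (mn mx : Int) (changes : PySem.Set Int) : Int × Int :=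
  let kp := (PySem.List.enumerate nums).foldl
    (fun (acc : Bool × Bool) e =>
      if !(PySem.Set.contains changes e.1) then
        ((if e.2 == mn then true else acc.1), (if e.2 == mx then true else acc.2))
      else acc) (false, false)
  let newMin := if kp.1 then mn else mn + 1
  let newMax := if kp.2 then mx else mx - 1
  (PySem.Set.len changes, max (newMax - newMin) 1)

def makeParityAlternating (nums : List Int) : List Int :=
  if PySem.List.len nums == 1 then [0, 0] else
  let cls := (PySem.List.enumerate nums).foldl pvA_classify ([], [])
  let se : PySem.Set Int := PySem.Set.ofList cls.1
  let so : PySem.Set Int := PySem.Set.ofList cls.2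
  let mn := (PySem.List.min? nums (fun x => x)).getD 0     -- Pre_ excludes []: min(nums) raises there
  let mx := (PySem.List.max? nums (fun x => x)).getD 0
  if PySem.Set.len se == PySem.Set.len so then
    let t1 := pvA_apply nums mn mx se
    let t2 := pvA_apply nums mn mx so
    let m := if t1.1 < t2.1 ∨ (t1.1 = t2.1 ∧ t1.2 ≤ t2.2) then t1 else t2
    [m.1, m.2]
  else
    let t := pvA_apply nums mn mx (if PySem.Set.len se < PySem.Set.len so then se else so)
    [t.1, t.2]

-- ===== PORT B =====
structure PVAcc where
  nse : Int
  kmSe : Bool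
  kMSe : Bool
  kmSo : Bool
  kMSo : Bool
deriving DecidableEq, Repr

def pvB_step (mn mx : Int) (a : PVAcc) (e : Int × Int) : PVAcc :=
  if PySem.Int.mod e.2 2 != PySem.Int.mod e.1 2 then
    { a with nse := a.nse + 1,
             kmSo := if e.2 == mn then true else a.kmSo,
             kMSo := if e.2 == mx then true else a.kMSo }
  else
    { a with kmSe := if e.2 == mn then true else a.kmSe,
             kMSe := if e.2 == mx then true else a.kMSe }

def pvB_score (mn mx : Int) (km kM : Bool) : Int :=
  max ((if kM then mx else mx - 1) - (if km then mn else mn + 1)) 1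

def makeParityAlternating_alt (nums : List Int) : List Int :=
  if PySem.List.len nums == 1 then [0, 0] else
  let mn := (PySem.List.min? nums (fun x => x)).getD 0     -- Pre_ excludes []: min(nums) raises there
  let mx := (PySem.List.max? nums (fun x => x)).getD 0
  let a := (PySem.List.enumerate nums).foldl (pvB_step mn mx) ⟨0, false, false, false, false⟩
  let nso := PySem.List.len nums - a.nse
  if a.nse == nso then
    [a.nse, min (pvB_score mn mx a.kmSe a.kMSe) (pvB_score mn mx a.kmSo a.kMSo)]
  else if a.nse < nso then [a.nse, pvB_score mn mx a.kmSe a.kMSe]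
  else [nso, pvB_score mn mx a.kmSo a.kMSo]

-- ===== PRECONDITION & SPEC =====
-- Pre_ excludes the empty list, on which A raises ValueError (min of an empty sequence).
def Pre_makeParityAlternating (nums : List Int) : Prop := nums ≠ []
instance (nums : List Int) : Decidable (Pre_makeParityAlternating nums) := by unfold Pre_makeParityAlternating; infer_instance
def pvWitness_makeParityAlternating : List Int := [3, 1, 4]

def Spec_makeParityAlternating (nums : List Int) (out : List Int) : Prop := out = makeParityAlternating_alt nums
instance (nums : List Int) (out : List Int) : Decidable (Spec_makeParityAlternating nums out) := by unfold Spec_makeParityAlternating; infer_instance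

-- ===== CLAIM (what is proved, stated in full; the proofs are below) =====
def Claim_equal_makeParityAlternating : Prop := ∀ (nums : List Int), Dom_makeParityAlternating nums → Pre_makeParityAlternating nums → Spec_makeParityAlternating nums (makeParityAlternating nums)

-- ===== LEMMAS AND PROOFS =====

-- the parity-mismatch predicate both programs classify by
def pvPred (e : Int × Int) : Bool := PySem.Int.mod e.2 2 != PySem.Int.mod e.1 2

theorem pvA_classify_eq (acc : List Int × List Int) (e : Int × Int) :
    pvA_classify acc e = if pvPred e then (acc.1 ++ [e.1], acc.2) else (acc.1, acc.2 ++ [e.1]) := by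
  unfold pvA_classify pvPred
  rw [PySem.Int.mod_eq_emod_of_pos (a := e.1 + 1) (by norm_num),
      PySem.Int.mod_eq_emod_of_pos (a := e.1) (by norm_num),
      PySem.Int.mod_eq_emod_of_pos (a := e.2) (by norm_num)]
  rcases Int.emod_two_eq e.1 with h1 | h1 <;> rcases Int.emod_two_eq e.2 with h2 | h2 <;>
    · have hx : (e.1 + 1) % 2 = 1 ∨ (e.1 + 1) % 2 = 0 := by omega
      rcases hx with hx | hx <;> simp_all <;> omega

theorem pv_classify_fold (l : List (Int × Int)) :
    l.foldl pvA_classify ([], []) =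
      ((l.filter pvPred).map (·.1), (l.filter (fun e => !pvPred e)).map (·.1)) := by
  have h : l.foldl pvA_classify (([], []) : List Int × List Int) =
      l.foldl (fun (acc : List Int × List Int) e =>
        ((if pvPred e then acc.1 ++ [e.1] else acc.1),
         (if !pvPred e then acc.2 ++ [e.1] else acc.2))) ([], []) := by
    apply PySem.List.foldl_congr_mem
    intro a x _
    rw [pvA_classify_eq]
    by_cases h : pvPred x <;> simp [h]
  rw [h, PySem.List.foldl_prod_mk
        (f := fun a e => if pvPred e then a ++ [e.1] else a)
        (g := fun a e => if !pvPred e then a ++ [e.1] else a),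
      PySem.List.foldl_append_if pvPred (·.1),
      PySem.List.foldl_append_if (fun e => !pvPred e) (·.1)]
  simp

theorem pv_mem_map_fst_filter (nums : List Int) (q : Int × Int → Bool) (e : Int × Int)
    (he : e ∈ PySem.List.enumerate nums) :
    (e.1 ∈ ((PySem.List.enumerate nums).filter q).map (·.1)) ↔ q e = true := by
  constructor
  · intro h
    simp only [List.mem_map, List.mem_filter] at h
    obtain ⟨e', ⟨he', hq⟩, h1⟩ := h
    rw [PySem.List.mem_enumerate_iff] at he' he
    obtain ⟨k, hk, rfl⟩ := he
    obtain ⟨k', hk', rfl⟩ := he'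
    simp at h1
    have : k' = k := by exact_mod_cast h1
    subst this
    exact hq
  · intro h
    exact List.mem_map.2 ⟨e, List.mem_filter.2 ⟨he, h⟩, rfl⟩

theorem pv_nodup_map_fst_filter (nums : List Int) (q : Int × Int → Bool) :
    (((PySem.List.enumerate nums).filter q).map (·.1)).Nodup := by
  have h : ((PySem.List.enumerate nums).filter q).Pairwise (fun p q => p.1 < q.1) :=
    (PySem.List.pairwise_lt_enumerate nums 0).filter _
  have h2 : (((PySem.List.enumerate nums).filter q).map (·.1)).Pairwise (· < ·) :=
    List.pairwise_map.2 h
  exact h2.imp (fun hlt => ne_of_lt hlt)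

theorem pv_foldl_add_nodup (xs s : List Int) (hs : ∀ x ∈ xs, x ∉ s) (hx : xs.Nodup) :
    xs.foldl PySem.Set.add s = s ++ xs := by
  induction xs generalizing s with
  | nil => simp
  | cons x t ih =>
    have hxs : x ∉ s := hs x (by simp)
    have hc : PySem.Set.contains s x = false := by
      simp [PySem.Set.contains]
      exact hxs
    simp only [List.foldl_cons]
    rw [show PySem.Set.add s x = s ++ [x] by simp [PySem.Set.add, PySem.Set.contains, hxs]]
    rw [ih (s ++ [x]) (by
      intro y hy
      simp only [List.mem_append, List.mem_singleton]
      rintro (h | rfl)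
      · exact hs y (by simp [hy]) h
      · exact (List.nodup_cons.1 hx).1 hy) (List.nodup_cons.1 hx).2]
    simp

theorem pv_ofList_nodup (xs : List Int) (hnd : xs.Nodup) : PySem.Set.ofList xs = xs := by
  have := pv_foldl_add_nodup xs [] (by simp) hnd
  simpa [PySem.Set.ofList, PySem.Set.empty] using this

theorem pvB_fold (mn mx : Int) (l : List (Int × Int)) (a : PVAcc) :
    l.foldl (pvB_step mn mx) a =
      ⟨a.nse + (l.countP pvPred : Int),
       a.kmSe || (l.filter (fun e => !pvPred e)).any (fun e => e.2 == mn),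
       a.kMSe || (l.filter (fun e => !pvPred e)).any (fun e => e.2 == mx),
       a.kmSo || (l.filter pvPred).any (fun e => e.2 == mn),
       a.kMSo || (l.filter pvPred).any (fun e => e.2 == mx)⟩ := by
  induction l generalizing a with
  | nil => simp
  | cons e t ih =>
    obtain ⟨n, b1, b2, b3, b4⟩ := a
    by_cases h : pvPred e
    · have hstep : pvB_step mn mx ⟨n, b1, b2, b3, b4⟩ e =
        ⟨n + 1, b1, b2, (if e.2 == mn then true else b3), (if e.2 == mx then true else b4)⟩ := by
        simp [pvB_step, pvPred] at h ⊢
        simp [h]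
      simp only [List.foldl_cons, hstep, ih, PVAcc.mk.injEq]
      refine ⟨?_, ?_, ?_, ?_, ?_⟩
      · simp [List.countP_cons, h]; ring
      · simp [List.filter_cons, h]
      · simp [List.filter_cons, h]
      · simp only [List.filter_cons, h, if_true, List.any_cons]
        by_cases hm : (e.2 == mn) <;> simp [hm]
      · simp only [List.filter_cons, h, if_true, List.any_cons]
        by_cases hM : (e.2 == mx) <;> simp [hM]
    · have hstep : pvB_step mn mx ⟨n, b1, b2, b3, b4⟩ e =
        ⟨n, (if e.2 == mn then true else b1), (if e.2 == mx then true else b2), b3, b4⟩ := by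
        simp [pvB_step, pvPred] at h ⊢
        simp [h]
      simp only [List.foldl_cons, hstep, ih, PVAcc.mk.injEq]
      refine ⟨?_, ?_, ?_, ?_, ?_⟩
      · simp [List.countP_cons, h]
      · simp only [List.filter_cons, h, Bool.not_false, if_true, List.any_cons]
        by_cases hm : (e.2 == mn) <;> simp [hm]
      · simp only [List.filter_cons, h, Bool.not_false, if_true, List.any_cons]
        by_cases hM : (e.2 == mx) <;> simp [hM]
      · simp [List.filter_cons, h]
      · simp [List.filter_cons, h]

theorem pvA_apply_eq (nums : List Int) (mn mx : Int) (s : PySem.Set Int) (q : Int × Int → Bool)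
    (hmem : ∀ e ∈ PySem.List.enumerate nums, PySem.Set.contains s e.1 = q e) :
    pvA_apply nums mn mx s =
      (PySem.Set.len s,
       max ((if ((PySem.List.enumerate nums).filter (fun e => !q e)).any (fun e => e.2 == mx) then mx else mx - 1)
          - (if ((PySem.List.enumerate nums).filter (fun e => !q e)).any (fun e => e.2 == mn) then mn else mn + 1)) 1) := by
  unfold pvA_apply
  have h1 : (PySem.List.enumerate nums).foldl
      (fun (acc : Bool × Bool) e =>
        if !(PySem.Set.contains s e.1) then
          ((if e.2 == mn then true else acc.1), (if e.2 == mx then true else acc.2))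
        else acc) (false, false) =
      (PySem.List.enumerate nums).foldl
      (fun (acc : Bool × Bool) e =>
        if !q e then
          ((if e.2 == mn then true else acc.1), (if e.2 == mx then true else acc.2))
        else acc) (false, false) := by
    apply PySem.List.foldl_congr_mem
    intro acc e he
    rw [hmem e he]
  rw [h1, PySem.List.foldl_if_eq_foldl_filter (fun e => !q e),
      PySem.List.foldl_prod_mk
        (f := fun acc (e : Int × Int) => if e.2 == mn then true else acc)
        (g := fun acc (e : Int × Int) => if e.2 == mx then true else acc),
      PySem.List.foldl_if_true_eq (fun (e : Int × Int) => e.2 == mn),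
      PySem.List.foldl_if_true_eq (fun (e : Int × Int) => e.2 == mx)]
  simp only [Bool.false_or]

theorem makeParityAlternating_eq (nums : List Int) (h : nums ≠ []) :
    makeParityAlternating nums = makeParityAlternating_alt nums := by
  unfold makeParityAlternating makeParityAlternating_alt
  by_cases hlen : PySem.List.len nums == 1
  · have h1 : nums.length = 1 := by
      simp only [PySem.List.len_eq, beq_iff_eq] at hlen
      exact_mod_cast hlen
    simp [h1]
  · simp only [hlen, Bool.false_eq_true, if_false]
    set E := PySem.List.enumerate nums with hE
    set mn := (PySem.List.min? nums (fun x => x)).getD 0 with hmn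
    set mx := (PySem.List.max? nums (fun x => x)).getD 0 with hmx
    set seL := (E.filter pvPred).map (·.1) with hseL
    set soL := (E.filter (fun e => !pvPred e)).map (·.1) with hsoL
    have hcls : E.foldl pvA_classify ([], []) = (seL, soL) := pv_classify_fold E
    have hse : PySem.Set.ofList seL = seL := pv_ofList_nodup _ (pv_nodup_map_fst_filter nums pvPred)
    have hso : PySem.Set.ofList soL = soL := pv_ofList_nodup _ (pv_nodup_map_fst_filter nums _)
    have hconSe : ∀ e ∈ E, PySem.Set.contains (seL : PySem.Set Int) e.1 = pvPred e := by
      intro e he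
      have hiff := pv_mem_map_fst_filter nums pvPred e he
      simp only [PySem.Set.contains]
      apply Bool.coe_iff_coe.mp
      rw [List.contains_iff_mem]
      exact hiff
    have hconSo : ∀ e ∈ E, PySem.Set.contains (soL : PySem.Set Int) e.1 = !pvPred e := by
      intro e he
      have hiff := pv_mem_map_fst_filter nums (fun e => !pvPred e) e he
      simp only [PySem.Set.contains]
      apply Bool.coe_iff_coe.mp
      rw [List.contains_iff_mem]
      exact hiff
    have hfilterNotNot : E.filter (fun e => !!pvPred e) = E.filter pvPred := by
      simp
    have happlySe := pvA_apply_eq nums mn mx (seL : PySem.Set Int) pvPred hconSe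
    have happlySo := pvA_apply_eq nums mn mx (soL : PySem.Set Int) (fun e => !pvPred e) hconSo
    rw [hfilterNotNot] at happlySo
    have hlenSe : PySem.Set.len (seL : PySem.Set Int) = (E.countP pvPred : Int) := by
      simp [PySem.Set.len, hseL, ← List.countP_eq_length_filter]
    have hlenSo : PySem.Set.len (soL : PySem.Set Int) = ((nums.length : Int) - (E.countP pvPred : Int)) := by
      simp only [PySem.Set.len, hsoL, List.length_map, ← List.countP_eq_length_filter]
      have h1 : E.countP pvPred + E.countP (fun e => !pvPred e) = E.length := by
        have h0 := List.length_eq_countP_add_countP (p := pvPred) (l := E)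
        simp at h0
        omega
      have h2 : E.length = nums.length := PySem.List.length_enumerate nums 0
      omega
    have hB := pvB_fold mn mx E ⟨0, false, false, false, false⟩
    -- abbreviations for the four survival booleans and the count
    set c : Int := (E.countP pvPred : Int) with hc
    set kmSe := (E.filter (fun e => !pvPred e)).any (fun e => e.2 == mn) with hkmSe
    set kMSe := (E.filter (fun e => !pvPred e)).any (fun e => e.2 == mx) with hkMSe
    set kmSo := (E.filter pvPred).any (fun e => e.2 == mn) with hkmSo
    set kMSo := (E.filter pvPred).any (fun e => e.2 == mx) with hkMSo
    simp only [PySem.Set.len] at hlenSe hlenSo happlySe happlySo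
    have hsc : ∀ km kM : Bool,
        max ((if kM then mx else mx - 1) - (if km then mn else mn + 1)) 1 = pvB_score mn mx km kM := by
      intro km kM; rfl
    simp only [hcls, hse, hso, hB, PySem.List.len_eq, zero_add, PySem.Set.len,
               apply_ite (pvA_apply nums mn mx), happlySe, happlySo]
    rw [hlenSe, hlenSo]
    by_cases heq : c = (nums.length : Int) - c
    · have hbeq : (c == (nums.length : Int) - c) = true := beq_iff_eq.mpr heq
      simp only [hbeq, ← heq, lt_irrefl, false_or, true_and]
      rw [min_def]
      by_cases hle : pvB_score mn mx kmSe kMSe ≤ pvB_score mn mx kmSo kMSo <;>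
        simp [hle, hsc]
    · have hbeq : (c == (nums.length : Int) - c) = false := beq_eq_false_iff_ne.mpr heq
      simp only [hbeq, Bool.false_eq_true, if_false]
      by_cases hlt : c < (nums.length : Int) - c <;> simp [hlt, hsc]

-- ===== VERDICT (by name: the statement is the Claim_ definition above) =====
theorem makeParityAlternating_spec : Claim_equal_makeParityAlternating := by
  intro nums _ hpre
  unfold Spec_makeParityAlternating
  exact makeParityAlternating_eq nums hpre
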